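-- pv_equiv track=rewrite | github.com/a-poor/wa_process_server | code/nysCourt_firmRecordInterpreter.py | normalizeFirmName
-- ===== SOURCE A (Python) =====
-- import string
--
-- def normalizeFirmName(firmName):
--     '''Takes a firm name as input and returns a normalized list of words, for comparison.'''
--     normName = ''
--     for char in firmName:
--         if char not in string.punctuation:
--             normName += char
--         else:
--             normName += ' '
--     normName = normName.lower().split()
--     return normName
-- ===== SOURCE B (Python) =====
-- import string
--
-- _DELIMS = set(string.punctuation)
--
-- def normalizeFirmName(firmName):
--     '''Takes a firm name as input and returns a normalized list of words, for comparison.'''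
--     words = []
--     cur = []
--     for ch in firmName:
--         if ch in _DELIMS or ch.isspace():
--             if cur:
--                 words.append(''.join(cur))
--                 cur = []
--         else:
--             cur.append(ch.lower())
--     if cur:
--         words.append(''.join(cur))
--     return words
-- ===== Notes on version B (the rewrite author's own statement) =====
-- stated objective: alternative
-- what changed: Instead of A's staged passes (replace punctuation by spaces in a growing string, then lower(), then split()), B is a single-pass state machine over the characters that builds the word list directly, flushing the current word whenever it meets punctuation or whitespace, with no intermediate string at all.
import Mathlib
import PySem

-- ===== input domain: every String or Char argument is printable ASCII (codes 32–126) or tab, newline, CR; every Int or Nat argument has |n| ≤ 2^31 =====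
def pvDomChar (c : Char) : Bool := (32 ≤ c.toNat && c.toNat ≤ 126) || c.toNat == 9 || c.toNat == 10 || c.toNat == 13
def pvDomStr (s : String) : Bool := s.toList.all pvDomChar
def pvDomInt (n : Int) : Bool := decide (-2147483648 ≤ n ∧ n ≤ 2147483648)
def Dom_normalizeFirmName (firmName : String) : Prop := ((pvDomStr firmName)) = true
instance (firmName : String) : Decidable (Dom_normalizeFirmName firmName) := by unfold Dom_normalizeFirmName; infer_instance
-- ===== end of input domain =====

-- B replaces A's staged passes (punctuation→space string, then lower, then split)
-- by a single-pass word-building state machine with no intermediate string (alternative).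


-- string.punctuation
def pvPunct : List Char := "!\"#$%&'()*+,-./:;<=>?@[\\]^_`{|}~".toList

-- ===== PORT A =====
-- normName = ''; for char: if char not in punctuation: normName += char else normName += ' ';
-- then normName.lower().split()
def normalizeFirmName (firmName : String) : List String :=
  let normName : List Char :=
    firmName.toList.foldl
      (fun acc c =>
        if PySem.Chars.isIn [c] pvPunct = false then acc ++ [c] else acc ++ [' '])
      []
  (PySem.Chars.split₀ (PySem.Chars.lower normName)).map String.mk

-- ===== PORT B =====
-- ch in _DELIMS or ch.isspace()
def pvIsDelim (c : Char) : Bool :=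
  PySem.Chars.isIn [c] pvPunct || PySem.Chars.isspace c

-- the loop of Source B: state (words, cur); flush cur on a delimiter, else append ch.lower()
def pvAltGo : List Char → List (List Char) → List Char → List (List Char)
  | [], words, cur => if cur.isEmpty then words else words ++ [cur]
  | c :: rest, words, cur =>
      if pvIsDelim c then
        if cur.isEmpty then pvAltGo rest words []
        else pvAltGo rest (words ++ [cur]) []
      else pvAltGo rest words (cur ++ [PySem.Chars.lowerChar c])

def normalizeFirmName_alt (firmName : String) : List String :=
  (pvAltGo firmName.toList [] []).map String.mk

-- ===== PRECONDITION & SPEC =====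
def Spec_normalizeFirmName (firmName : String) (out : List String) : Prop := out = normalizeFirmName_alt firmName
instance (firmName : String) (out : List String) : Decidable (Spec_normalizeFirmName firmName out) := by unfold Spec_normalizeFirmName; infer_instance

-- ===== CLAIM (what is proved, stated in full; the proofs are below) =====
def Claim_equal_normalizeFirmName : Prop := ∀ (firmName : String), Dom_normalizeFirmName firmName → Spec_normalizeFirmName firmName (normalizeFirmName firmName)

-- ===== LEMMAS AND PROOFS =====

-- A's accumulator loop is the map of the per-character branch
theorem pv_foldl_map :
    ∀ (l acc : List Char),
      l.foldl (fun acc c => if PySem.Chars.isIn [c] pvPunct = false then acc ++ [c] else acc ++ [' ']) acc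
        = acc ++ l.map (fun c => if c ∈ pvPunct then ' ' else c) := by
  intro l
  induction l with
  | nil => intro acc; simp
  | cons c cs ih =>
      intro acc
      have hmem : PySem.Chars.isIn [c] pvPunct = true ↔ c ∈ pvPunct := by
        rw [PySem.Chars.isIn_iff_infix, List.singleton_infix_iff]
      simp only [List.foldl_cons, List.map_cons, ih]
      by_cases h : c ∈ pvPunct
      · have : PySem.Chars.isIn [c] pvPunct = true := hmem.mpr h
        simp [this, h]
      · have : PySem.Chars.isIn [c] pvPunct = false := by
          cases hb : PySem.Chars.isIn [c] pvPunct
          · rfl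
          · exact absurd (hmem.mp hb) h
        simp [this, h]

-- the per-character agreement: on Dom, "is whitespace after A's replace+lower" = "is a delimiter for B"
theorem pv_key (c : Char) (h : pvDomChar c = true) :
    PySem.Chars.isspace (PySem.Chars.lowerChar (if c ∈ pvPunct then ' ' else c)) = pvIsDelim c := by
  have hmem : PySem.Chars.isIn [c] pvPunct = true ↔ c ∈ pvPunct := by
    rw [PySem.Chars.isIn_iff_infix, List.singleton_infix_iff]
  by_cases hp : c ∈ pvPunct
  · rw [if_pos hp]
    have h1 : PySem.Chars.isIn [c] pvPunct = true := hmem.mpr hp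
    simp only [pvIsDelim, h1, Bool.true_or]
    decide
  · rw [if_neg hp]
    have h1 : PySem.Chars.isIn [c] pvPunct = false := by
      cases hb : PySem.Chars.isIn [c] pvPunct
      · rfl
      · exact absurd (hmem.mp hb) hp
    simp only [pvIsDelim, h1, Bool.false_or]
    -- isspace (lowerChar c) = isspace c
    unfold PySem.Chars.lowerChar
    by_cases hu : PySem.Chars.isupper c = true
    · have hr : 65 ≤ c.toNat ∧ c.toNat ≤ 90 := by
        unfold PySem.Chars.isupper at hu
        simp only [Bool.and_eq_true, decide_eq_true_eq] at hu
        exact ⟨hu.1, hu.2⟩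
      have hv : (c.toNat + 32).isValidChar := Or.inl (by omega)
      have htn : (Char.ofNat (c.toNat + 32)).toNat = c.toNat + 32 := by
        rw [Char.toNat_ofNat, if_pos hv]
      simp only [if_pos hu]
      unfold PySem.Chars.isspace
      simp only [htn]
      have h1 := hr.1; have h2 := hr.2
      apply Bool.eq_iff_iff.mpr
      simp only [Bool.or_eq_true, Bool.and_eq_true, decide_eq_true_eq]
      constructor <;> intro hh <;> omega
    · simp [hu]

-- the two recursions agree step for step (words = accR.reverse, cur = curR.reverse)
theorem pv_go_eq :
    ∀ (s : List Char), (∀ c ∈ s, pvDomChar c = true) →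
      ∀ (curR : List Char) (accR : List (List Char)),
        PySem.Chars.split₀.go
            (PySem.Chars.lower (s.map (fun c => if c ∈ pvPunct then ' ' else c))) curR accR
          = pvAltGo s accR.reverse curR.reverse := by
  intro s
  induction s with
  | nil =>
      intro _ curR accR
      simp only [List.map_nil, PySem.Chars.lower, PySem.Chars.split₀.go, pvAltGo]
      by_cases hc : curR.isEmpty
      · simp [hc, List.isEmpty_iff.mp hc]
      · have : curR ≠ [] := fun h => hc (by simp [h])
        simp [hc, this]
  | cons c cs ih =>
      intro hdom curR accR
      have hc : pvDomChar c = true := hdom c (List.mem_cons_self ..)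
      have hcs : ∀ x ∈ cs, pvDomChar x = true := fun x hx => hdom x (List.mem_cons_of_mem _ hx)
      have ih' : ∀ (curR : List Char) (accR : List (List Char)),
          PySem.Chars.split₀.go
              (List.map PySem.Chars.lowerChar
                (List.map (fun c => if c ∈ pvPunct then ' ' else c) cs)) curR accR
            = pvAltGo cs accR.reverse curR.reverse := by
        simpa [PySem.Chars.lower] using ih hcs
      have ih2 : ∀ (curR : List Char) (accR : List (List Char)),
          PySem.Chars.split₀.go
              (List.map (PySem.Chars.lowerChar ∘ fun c => if c ∈ pvPunct then ' ' else c) cs) curR accR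
            = pvAltGo cs accR.reverse curR.reverse := by
        simpa [List.map_map] using ih' 
      by_cases hd : pvIsDelim c = true
      · have hsp : PySem.Chars.isspace
            (PySem.Chars.lowerChar (if c ∈ pvPunct then ' ' else c)) = true := by
          rw [pv_key c hc]; exact hd
        by_cases hcur : curR = []
        · subst hcur
          simp [PySem.Chars.lower, PySem.Chars.split₀.go, hsp, pvAltGo, hd, ih2]
        · simp [PySem.Chars.lower, PySem.Chars.split₀.go, hsp, pvAltGo, hd, hcur, ih2]
      · have hsp : PySem.Chars.isspace
            (PySem.Chars.lowerChar (if c ∈ pvPunct then ' ' else c)) = false := by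
          rw [pv_key c hc]; simpa using hd
        have hfc : (if c ∈ pvPunct then ' ' else c) = c := by
          by_cases hp : c ∈ pvPunct
          · exfalso
            have : PySem.Chars.isIn [c] pvPunct = true := by
              rw [PySem.Chars.isIn_iff_infix, List.singleton_infix_iff]; exact hp
            exact hd (by simp [pvIsDelim, this])
          · simp [hp]
        have hsp2 : PySem.Chars.isspace (PySem.Chars.lowerChar c) = false := hfc ▸ hsp
        simp [PySem.Chars.lower, PySem.Chars.split₀.go, hsp2, pvAltGo, hd, hfc, ih2]

-- ===== VERDICT (by name: the statement is the Claim_ definition above) =====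
theorem normalizeFirmName_spec : Claim_equal_normalizeFirmName := by
  intro firmName hdom
  simp only [Spec_normalizeFirmName, normalizeFirmName, normalizeFirmName_alt]
  rw [pv_foldl_map firmName.toList []]
  simp only [List.nil_append]
  have hdom' : ∀ c ∈ firmName.toList, pvDomChar c = true := by
    have := hdom
    unfold Dom_normalizeFirmName pvDomStr at this
    exact fun c hc => List.all_eq_true.mp this c hc
  rw [show PySem.Chars.split₀
        (PySem.Chars.lower (firmName.toList.map (fun c => if c ∈ pvPunct then ' ' else c)))
      = PySem.Chars.split₀.go
          (PySem.Chars.lower (firmName.toList.map (fun c => if c ∈ pvPunct then ' ' else c))) [] []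
      from rfl]
  rw [pv_go_eq firmName.toList hdom' [] []]
  simp
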